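-- pv_equiv track=rewrite | github.com/sandeepprukmani-maker/ginger | visionvault/services/multi_strategy_healer.py | _apply_strategy
-- ===== SOURCE A (Python) =====
-- from typing import Dict, List, Optional, Tuple
--
-- def _apply_strategy(full_code: str, failed_step: int, strategy: Dict) -> str:
--     """Apply a strategy to the code"""
--     # Find and replace the failed step with the strategy's code
--     lines = full_code.split('\n')
--     new_lines = []
--     in_failed_step = False
--     step_replaced = False
--
--     for line in lines:
--         # Check if we're at the failed step
--         if f'STEP {failed_step}:' in line or f'Step {failed_step}:' in line:
--             in_failed_step = True
--             new_lines.append(line)  # Keep the comment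
--             # Add the strategy code
--             strategy_code = strategy.get('code', '')
--             for strategy_line in strategy_code.split('\n'):
--                 new_lines.append(' ' * 12 + strategy_line)  # Proper indentation
--             step_replaced = True
--             continue
--
--         # Skip original failed step code
--         if in_failed_step:
--             # Check if we've moved to next step
--             if ('STEP' in line or 'Step' in line) and str(failed_step) not in line:
--                 in_failed_step = False
--                 new_lines.append(line)
--             elif not line.strip().startswith('#'):
--                 # Skip the original failed code
--                 continue
--             else:
--                 new_lines.append(line)
--         else:
--             new_lines.append(line)
--
--     if not step_replaced:
--         # Fallback: just append strategy at the end
--         return full_code + '\n' + strategy.get('code', '')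
--
--     return '\n'.join(new_lines)
-- ===== SOURCE B (Python) =====
-- def _apply_strategy(full_code: str, failed_step: int, strategy: dict) -> str:
--     """Apply a strategy to the code (segment-based: group lines into blocks per
--     failed-step header, then rewrite each block by slicing and filtering)."""
--     hu = f'STEP {failed_step}:'
--     hl = f'Step {failed_step}:'
--     sn = str(failed_step)
--
--     def is_header(l):
--         return hu in l or hl in l
--
--     def is_next_step(l):
--         return ('STEP' in l or 'Step' in l) and sn not in l
--
--     lines = full_code.split('\n')
--     # group: the prefix before the first header, then one segment per header line
--     prefix, segs = [], []
--     for l in lines: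
--         if is_header(l):
--             segs.append([l])
--         elif segs:
--             segs[-1].append(l)
--         else:
--             prefix.append(l)
--
--     if not segs:
--         # no failed-step header anywhere: append the strategy at the end
--         return full_code + '\n' + strategy.get('code', '')
--
--     indented = [' ' * 12 + t for t in strategy.get('code', '').split('\n')]
--     out = prefix
--     for seg in segs:
--         head, block = seg[0], seg[1:]
--         cut = next((k for k, l in enumerate(block) if is_next_step(l)), len(block))
--         out += [head] + indented + [l for l in block[:cut] if l.strip().startswith('#')] + block[cut:]
--     return '\n'.join(out)
-- ===== Notes on version B (the rewrite author's own statement) =====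
-- stated objective: alternative
-- what changed: A's single stateful pass with in_failed_step/step_replaced flags is replaced by grouping the lines into a prefix plus header-led segments and rewriting each segment independently (slice at the first next-step line, keep comments before it, keep everything after).
import Mathlib
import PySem

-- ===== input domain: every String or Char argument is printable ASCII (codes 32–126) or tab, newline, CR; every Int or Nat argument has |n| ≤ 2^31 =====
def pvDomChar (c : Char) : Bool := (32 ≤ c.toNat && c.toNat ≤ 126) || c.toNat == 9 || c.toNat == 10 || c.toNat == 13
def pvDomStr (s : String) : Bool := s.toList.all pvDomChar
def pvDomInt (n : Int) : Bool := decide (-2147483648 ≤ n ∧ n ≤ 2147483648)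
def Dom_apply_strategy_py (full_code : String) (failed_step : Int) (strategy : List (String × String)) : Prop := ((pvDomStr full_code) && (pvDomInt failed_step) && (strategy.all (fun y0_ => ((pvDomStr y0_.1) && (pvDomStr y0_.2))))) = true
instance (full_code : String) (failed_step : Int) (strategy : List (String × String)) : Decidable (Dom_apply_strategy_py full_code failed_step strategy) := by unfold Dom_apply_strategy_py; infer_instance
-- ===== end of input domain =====

-- B replaces A's single stateful pass (in_failed_step/step_replaced flags) by grouping the lines
-- into header-led segments that are rewritten independently by slicing and filtering (objective:
-- alternative decomposition, same cost).

-- shared line predicates (Source B's is_header / is_next_step and the comment test; port A uses them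
-- for the very same Python expressions it contains inline)
def pvHdr (failed_step : Int) (l : String) : Bool :=
  PySem.Str.isIn ("STEP " ++ PySem.Int.toStr failed_step ++ ":") l
    || PySem.Str.isIn ("Step " ++ PySem.Int.toStr failed_step ++ ":") l
def pvNext (failed_step : Int) (l : String) : Bool :=
  (PySem.Str.isIn "STEP" l || PySem.Str.isIn "Step" l)
    && !(PySem.Str.isIn (PySem.Int.toStr failed_step) l)
def pvComment (l : String) : Bool := PySem.Str.startswith (PySem.Str.strip l) "#"

-- ===== PORT A =====
-- literal transliteration of A's flag-machine loop
def apply_strategy_py (full_code : String) (failed_step : Int) (strategy : List (String × String)) : String :=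
  let lines := (PySem.Str.split? full_code "\n").getD []
  let r := lines.foldl (fun (st : List String × Bool × Bool) line =>
    if pvHdr failed_step line then
      (((PySem.Str.split? ((PySem.Dict.ofList strategy).getD "code" "") "\n").getD []).foldl
          (fun acc sl => acc ++ ["            " ++ sl]) (st.1 ++ [line]),
        true, true)
    else if st.2.1 then
      if pvNext failed_step line then
        (st.1 ++ [line], false, st.2.2)
      else if !(pvComment line) then
        (st.1, st.2.1, st.2.2)
      else (st.1 ++ [line], st.2.1, st.2.2)
    else (st.1 ++ [line], st.2.1, st.2.2)) ([], false, false)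
  if !r.2.2 then full_code ++ "\n" ++ (PySem.Dict.ofList strategy).getD "code" ""
  else PySem.Str.join "\n" r.1

-- ===== PORT B =====
-- literal transliteration of Source B: group into (prefix, segments), then rewrite each segment
def apply_strategy_py_alt (full_code : String) (failed_step : Int) (strategy : List (String × String)) : String :=
  let lines := (PySem.Str.split? full_code "\n").getD []
  let g := lines.foldl (fun (st : List String × List (List String)) l =>
      if pvHdr failed_step l then (st.1, st.2 ++ [[l]])
      else match st.2 with
        | [] => (st.1 ++ [l], st.2)
        | _ => (st.1, st.2.dropLast ++ [st.2.getLastD [] ++ [l]]))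
    ([], [])
  match g.2 with
  | [] => full_code ++ "\n" ++ (PySem.Dict.ofList strategy).getD "code" ""
  | _ =>
    let indented := ((PySem.Str.split? ((PySem.Dict.ofList strategy).getD "code" "") "\n").getD []).map
        (fun t => "            " ++ t)
    let out := g.2.foldl (fun out seg =>
        out ++ [seg.headD ""] ++ indented
          ++ ((seg.tail.take (seg.tail.findIdx (pvNext failed_step))).filter pvComment
              ++ seg.tail.drop (seg.tail.findIdx (pvNext failed_step))))
      g.1
    PySem.Str.join "\n" out

-- ===== PRECONDITION & SPEC =====
def Spec_apply_strategy_py (full_code : String) (failed_step : Int) (strategy : List (String × String)) (out : String) : Prop := out = apply_strategy_py_alt full_code failed_step strategy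
instance (full_code : String) (failed_step : Int) (strategy : List (String × String)) (out : String) : Decidable (Spec_apply_strategy_py full_code failed_step strategy out) := by unfold Spec_apply_strategy_py; infer_instance

-- ===== CLAIM (what is proved, stated in full; the proofs are below) =====
def Claim_equal_apply_strategy_py : Prop := ∀ (full_code : String) (failed_step : Int) (strategy : List (String × String)), Dom_apply_strategy_py full_code failed_step strategy → Spec_apply_strategy_py full_code failed_step strategy (apply_strategy_py full_code failed_step strategy)

-- ===== LEMMAS AND PROOFS =====

-- reference semantics of A's state machine: output from the "outside" / "inside failed step" state
mutual
def pvOut (n : Int) (ind : List String) : List String → List String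
  | [] => []
  | l :: ls => if pvHdr n l then l :: (ind ++ pvIn n ind ls) else l :: pvOut n ind ls
def pvIn (n : Int) (ind : List String) : List String → List String
  | [] => []
  | l :: ls =>
    if pvHdr n l then l :: (ind ++ pvIn n ind ls)
    else if pvNext n l then l :: pvOut n ind ls
    else if pvComment l then l :: pvIn n ind ls
    else pvIn n ind ls
end

-- A's final in_failed_step flag
def pvEnd (n : Int) (inf : Bool) : List String → Bool
  | [] => inf
  | l :: ls => pvEnd n (if pvHdr n l then true else if pvNext n l then false else inf) ls

-- structural version of B's grouping pass
def pvSplit (n : Int) : List String → List String × List (List String)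
  | [] => ([], [])
  | l :: ls =>
    let r := pvSplit n ls
    if pvHdr n l then ([], (l :: r.1) :: r.2) else (l :: r.1, r.2)

-- B's per-segment rewrite
def pvBlock (n : Int) (block : List String) : List String :=
  (block.take (block.findIdx (pvNext n))).filter pvComment
    ++ block.drop (block.findIdx (pvNext n))

def pvSeg (n : Int) (ind : List String) (seg : List String) : List String :=
  seg.headD "" :: (ind ++ pvBlock n seg.tail)

-- A's loop computes (acc ++ run, final flag, rep || any header)
theorem pv_foldA (n : Int) (code : List String) (ls : List String) :
    ∀ (acc : List String) (inf rep : Bool),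
    ls.foldl (fun (st : List String × Bool × Bool) line =>
      if pvHdr n line then
        (code.foldl (fun acc sl => acc ++ ["            " ++ sl]) (st.1 ++ [line]), true, true)
      else if st.2.1 then
        if pvNext n line then
          (st.1 ++ [line], false, st.2.2)
        else if !(pvComment line) then
          (st.1, st.2.1, st.2.2)
        else (st.1 ++ [line], st.2.1, st.2.2)
      else (st.1 ++ [line], st.2.1, st.2.2)) (acc, inf, rep)
    = (acc ++ (if inf then pvIn n (code.map (fun t => "            " ++ t)) ls
               else pvOut n (code.map (fun t => "            " ++ t)) ls),
       pvEnd n inf ls, rep || ls.any (pvHdr n)) := by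
  induction ls with
  | nil => intro acc inf rep; cases inf <;> simp [pvEnd, pvOut, pvIn]
  | cons l ls ih =>
    intro acc inf rep
    simp only [List.foldl_cons, List.any_cons]
    by_cases hh : pvHdr n l = true
    · rw [if_pos hh, PySem.List.foldl_append_singleton_eq_map, ih]
      cases inf <;> simp [pvOut, pvIn, pvEnd, hh, List.append_assoc]
    · replace hh : pvHdr n l = false := by simpa using hh
      rw [if_neg (by simp [hh])]
      cases inf with
      | false =>
        simp only [Bool.false_eq_true, if_false]
        rw [ih]
        simp [pvOut, pvEnd, hh]
      | true =>
        rw [if_pos rfl]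
        by_cases hn : pvNext n l = true
        · rw [if_pos hn, ih]
          simp [pvIn, pvEnd, hh, hn]
        · replace hn : pvNext n l = false := by simpa using hn
          rw [if_neg (by simp [hn])]
          by_cases hc : pvComment l = true
          · rw [if_neg (by simp [hc]), ih]
            simp [pvIn, pvEnd, hh, hn, hc]
          · replace hc : pvComment l = false := by simpa using hc
            rw [if_pos (by simp [hc]), ih]
            simp [pvIn, pvEnd, hh, hn, hc]

-- B's grouping loop, once a segment is open, fills the last segment
theorem pv_foldB_ne (n : Int) (ls : List String) :
    ∀ (pre : List String) (segs : List (List String)) (cur : List String),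
    ls.foldl (fun (st : List String × List (List String)) l =>
      if pvHdr n l then (st.1, st.2 ++ [[l]])
      else match st.2 with
        | [] => (st.1 ++ [l], st.2)
        | _ => (st.1, st.2.dropLast ++ [st.2.getLastD [] ++ [l]]))
      (pre, segs ++ [cur])
    = (pre, segs ++ ((cur ++ (pvSplit n ls).1) :: (pvSplit n ls).2)) := by
  induction ls with
  | nil => intro pre segs cur; simp [pvSplit]
  | cons l ls ih =>
    intro pre segs cur
    simp only [List.foldl_cons]
    by_cases hh : pvHdr n l = true
    · rw [if_pos hh]
      have h2 : (segs ++ [cur]) ++ [[l]] = (segs ++ [cur]) ++ [[l]] := rfl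
      rw [show (pre, (segs ++ [cur]) ++ [[l]]) = (pre, (segs ++ [cur]) ++ [[l]]) from rfl]
      rw [ih pre (segs ++ [cur]) [l]]
      simp [pvSplit, hh]
    · rw [if_neg hh]
      have hm : (match segs ++ [cur] with
        | [] => (pre ++ [l], segs ++ [cur])
        | _ => (pre, (segs ++ [cur]).dropLast ++ [(segs ++ [cur]).getLastD [] ++ [l]]))
        = (pre, segs ++ [cur ++ [l]]) := by
        cases hsc : segs ++ [cur] with
        | nil => simp at hsc
        | cons a t =>
          simp only []
          rw [← hsc]
          simp
      rw [hm, ih]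
      replace hh : pvHdr n l = false := by simpa using hh
      simp [pvSplit, hh, List.append_assoc]

-- B's grouping loop from the initial state is pvSplit
theorem pv_foldB (n : Int) (ls : List String) :
    ∀ (pre : List String),
    ls.foldl (fun (st : List String × List (List String)) l =>
      if pvHdr n l then (st.1, st.2 ++ [[l]])
      else match st.2 with
        | [] => (st.1 ++ [l], st.2)
        | _ => (st.1, st.2.dropLast ++ [st.2.getLastD [] ++ [l]]))
      (pre, [])
    = (pre ++ (pvSplit n ls).1, (pvSplit n ls).2) := by
  induction ls with
  | nil => intro pre; simp [pvSplit]
  | cons l ls ih =>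
    intro pre
    simp only [List.foldl_cons]
    by_cases hh : pvHdr n l = true
    · rw [if_pos hh, pv_foldB_ne n ls pre [] [l]]
      simp [pvSplit, hh]
    · rw [if_neg hh]
      replace hh : pvHdr n l = false := by simpa using hh
      refine Eq.trans (ih (pre ++ [l])) ?_
      simp [pvSplit, hh, List.append_assoc]

-- no header ⟺ no segment, and then the prefix is everything
theorem pv_split_nil (n : Int) (ls : List String) :
    ((pvSplit n ls).2 = [] ↔ ls.any (pvHdr n) = false)
    ∧ ((pvSplit n ls).2 = [] → (pvSplit n ls).1 = ls) := by
  induction ls with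
  | nil => simp [pvSplit]
  | cons l ls ih =>
    by_cases hh : pvHdr n l = true
    · simp [pvSplit, hh]
    · replace hh : pvHdr n l = false := by simpa using hh
      simp only [pvSplit, hh, Bool.false_eq_true, if_false, List.any_cons, Bool.false_or]
      exact ⟨ih.1, fun h => by rw [ih.2 h]⟩

-- the state machine's output is exactly the segment-wise rewrite
theorem pv_run_split (n : Int) (ind : List String) (ls : List String) :
    pvOut n ind ls = (pvSplit n ls).1 ++ ((pvSplit n ls).2.flatMap (pvSeg n ind))
    ∧ pvIn n ind ls = pvBlock n (pvSplit n ls).1 ++ ((pvSplit n ls).2.flatMap (pvSeg n ind)) := by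
  induction ls with
  | nil => simp [pvOut, pvIn, pvSplit, pvBlock]
  | cons l ls ih =>
    by_cases hh : pvHdr n l = true
    · constructor
      · simp [pvOut, pvSplit, hh, pvSeg, ih.2]
      · simp [pvIn, pvSplit, hh, pvSeg, ih.2, pvBlock]
    · replace hh : pvHdr n l = false := by simpa using hh
      constructor
      · simp [pvOut, pvSplit, hh, ih.1]
      · by_cases hn : pvNext n l = true
        · simp only [pvIn, pvSplit, hh, Bool.false_eq_true, if_false, if_pos hn]
          rw [ih.1]
          simp [pvBlock, List.findIdx_cons, hn]
        · replace hn : pvNext n l = false := by simpa using hn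
          by_cases hc : pvComment l = true
          · simp only [pvIn, pvSplit, hh, hn, Bool.false_eq_true, if_false, if_pos hc]
            rw [ih.2]
            simp [pvBlock, List.findIdx_cons, hn, hc]
          · replace hc : pvComment l = false := by simpa using hc
            simp only [pvIn, pvSplit, hh, hn, hc, Bool.false_eq_true, if_false]
            rw [ih.2]
            simp [pvBlock, List.findIdx_cons, hn, hc]

-- B's output loop over the segments is a flatMap of the per-segment rewrite
theorem pv_foldSeg (n : Int) (ind : List String) (segs : List (List String)) :
    ∀ (pre : List String),
    segs.foldl (fun out seg =>
        out ++ [seg.headD ""] ++ ind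
          ++ ((seg.tail.take (seg.tail.findIdx (pvNext n))).filter pvComment
              ++ seg.tail.drop (seg.tail.findIdx (pvNext n)))) pre
    = pre ++ segs.flatMap (pvSeg n ind) := by
  induction segs with
  | nil => intro pre; simp
  | cons s segs ih =>
    intro pre
    simp only [List.foldl_cons, List.flatMap_cons, ih]
    simp [pvSeg, pvBlock, List.append_assoc]

-- ===== VERDICT (by name: the statement is the Claim_ definition above) =====
theorem apply_strategy_py_spec : Claim_equal_apply_strategy_py := by
  intro full_code failed_step strategy _
  unfold Spec_apply_strategy_py
  simp only [apply_strategy_py, apply_strategy_py_alt]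
  rw [pv_foldA, pv_foldB]
  rcases hsegs : (pvSplit failed_step ((PySem.Str.split? full_code "\n").getD [])).2 with _ | ⟨a, t⟩
  · have hany := (pv_split_nil failed_step ((PySem.Str.split? full_code "\n").getD [])).1.mp hsegs
    rw [hany]
    simp
  · have hany : ((PySem.Str.split? full_code "\n").getD []).any (pvHdr failed_step) = true := by
      by_contra hc
      replace hc : ((PySem.Str.split? full_code "\n").getD []).any (pvHdr failed_step) = false := by
        simpa using hc
      rw [(pv_split_nil failed_step ((PySem.Str.split? full_code "\n").getD [])).1.mpr hc] at hsegs
      simp at hsegs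
    rw [hany]
    simp only [List.nil_append, Bool.false_or, Bool.not_true, Bool.false_eq_true, if_false]
    rw [pv_foldSeg]
    rw [← hsegs]
    congr 1
    simpa using (pv_run_split failed_step
      (((PySem.Str.split? ((PySem.Dict.ofList strategy).getD "code" "") "\n").getD []).map
        (fun t => "            " ++ t)) ((PySem.Str.split? full_code "\n").getD [])).1
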